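-- pv_equiv track=rewrite | github.com/SuratanBoonpong/DataStructures-And-Algorithm-Grader | Lab9 Sorting/63011017_Lab09_3.py | isPlaindrome
-- ===== SOURCE A (Python) =====
-- def isPlaindrome(lists):
--     checkRepeater = False
--     checkAscending = True
--     for i in range(1,len(lists)):
--         if lists[i-1] > lists[i]:
--             checkAscending = False
--         if lists[i-1] == lists[i]:
--             checkRepeater = True
--     return checkRepeater and checkAscending and not isRepdrome(lists)
--
-- def isRepdrome(lists):
--     for i in range(1,len(lists)-1):
--         if lists[i-1] != lists[i]:
--             return False
--     return True
-- ===== SOURCE B (Python) =====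
-- def isPlaindrome(lists):
--     return lists == sorted(lists) and len(set(lists)) != len(lists) and any(x != lists[0] for x in lists)
-- ===== Notes on version B (the rewrite author's own statement) =====
-- stated objective: idiomatic
-- what changed: Replaces the index-driven adjacent-pair scan and the helper isRepdrome by a one-line predicate built from sorted(), set() and any(); the repdrome test becomes the intended 'not all elements equal' instead of A's scan that ignores the last element.
-- intended difference: On sorted lists of length >= 3 whose first n-1 elements are all equal and whose last element is strictly larger (e.g. [1,1,2]), A returns False because its isRepdrome loop stops one element early and wrongly classifies the list as a repdrome, while B returns True, which is intended since such a list is sorted, has a duplicate and is not all-equal. — e.g. on isPlaindrome([1, 1, 2]): A returns false, B returns true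
import Mathlib
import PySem

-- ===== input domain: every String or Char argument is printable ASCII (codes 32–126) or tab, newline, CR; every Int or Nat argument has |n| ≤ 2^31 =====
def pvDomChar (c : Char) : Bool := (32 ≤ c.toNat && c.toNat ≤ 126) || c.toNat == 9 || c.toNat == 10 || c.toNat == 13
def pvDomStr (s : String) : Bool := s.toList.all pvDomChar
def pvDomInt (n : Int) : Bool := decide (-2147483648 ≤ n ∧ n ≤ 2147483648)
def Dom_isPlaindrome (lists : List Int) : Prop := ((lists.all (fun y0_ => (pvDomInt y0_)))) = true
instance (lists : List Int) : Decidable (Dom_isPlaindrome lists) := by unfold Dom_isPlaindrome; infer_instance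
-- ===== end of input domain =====

-- B replaces A's index-driven adjacent-pair scan and its isRepdrome helper by a sorted()/set()/any()
-- one-liner (objective: idiomatic); B intentionally fixes isRepdrome's last-element off-by-one (see D_).

-- ===== PORT A =====
def isRepdromeLoop (lists : List Int) : List Int → Bool
  | [] => true
  | i :: rest =>
      if PySem.List.pyGetD lists (i - 1) 0 ≠ PySem.List.pyGetD lists i 0 then false
      else isRepdromeLoop lists rest

def isRepdrome (lists : List Int) : Bool :=
  isRepdromeLoop lists (PySem.List.pyRange 1 ((lists.length : Int) - 1) 1)

def isPlaindrome (lists : List Int) : Bool :=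
  let st := (PySem.List.pyRange 1 (lists.length : Int) 1).foldl
    (fun (s : Bool × Bool) i =>
      let prev := PySem.List.pyGetD lists (i - 1) 0
      let cur := PySem.List.pyGetD lists i 0
      let s1 := if prev > cur then (s.1, false) else s
      if prev = cur then (true, s1.2) else s1)
    (false, true)
  st.1 && st.2 && !(isRepdrome lists)

-- ===== PORT B =====
def isPlaindrome_alt (lists : List Int) : Bool :=
  decide (lists = PySem.List.sorted lists (fun x => x) false) &&
  decide (¬ (PySem.Set.len (PySem.Set.ofList lists) = lists.length)) &&
  lists.any (fun x => decide (¬ (x = PySem.List.pyGetD lists 0 0)))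

-- ===== PRECONDITION & SPEC =====
-- On sorted lists of length ≥ 3 whose first n-1 elements are all equal and whose last element is
-- strictly larger (e.g. [1,1,2]), A returns false because isRepdrome's loop stops one element early
-- and wrongly classifies the list as a repdrome; B returns true, the intended value, since such a
-- list is sorted, has a duplicate and is not all-equal.
def D_isPlaindrome (lists : List Int) : Prop :=
  3 ≤ lists.length ∧
  lists.dropLast.all (fun x => x == lists.headD 0) = true ∧
  lists.headD 0 < lists.getLastD 0
instance (lists : List Int) : Decidable (D_isPlaindrome lists) := by
  unfold D_isPlaindrome; infer_instance

def Spec_isPlaindrome (lists : List Int) (out : Bool) : Prop :=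
  ¬ D_isPlaindrome lists → out = isPlaindrome_alt lists
instance (lists : List Int) (out : Bool) : Decidable (Spec_isPlaindrome lists out) := by
  unfold Spec_isPlaindrome; infer_instance

def pvDiffWitness_isPlaindrome : List Int := [1, 1, 2]
def pvDiffWitnessOut_isPlaindrome : Bool × Bool := (false, true)

-- ===== CLAIM (what is proved, stated in full; the proofs are below) =====
def Claim_unchanged_isPlaindrome : Prop :=
  ∀ (lists : List Int), Dom_isPlaindrome lists → Spec_isPlaindrome lists (isPlaindrome lists)
def Claim_changed_isPlaindrome : Prop :=
  Dom_isPlaindrome (pvDiffWitness_isPlaindrome) ∧ D_isPlaindrome (pvDiffWitness_isPlaindrome) ∧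
  isPlaindrome (pvDiffWitness_isPlaindrome) = pvDiffWitnessOut_isPlaindrome.1 ∧
  isPlaindrome_alt (pvDiffWitness_isPlaindrome) = pvDiffWitnessOut_isPlaindrome.2 ∧
  pvDiffWitnessOut_isPlaindrome.1 ≠ pvDiffWitnessOut_isPlaindrome.2
def Claim_exact_isPlaindrome : Prop :=
  ∀ (lists : List Int), Dom_isPlaindrome lists → D_isPlaindrome lists →
    isPlaindrome lists ≠ isPlaindrome_alt lists

-- ===== LEMMAS AND PROOFS =====
-- ===== proof-side helpers =====
def sortedB (xs : List Int) : Bool := (xs.zip xs.tail).all (fun p => decide (p.1 ≤ p.2))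
def dupB (xs : List Int) : Bool := (xs.zip xs.tail).any (fun p => p.1 == p.2)
def eqAdjB (xs : List Int) : Bool := (xs.zip xs.tail).all (fun p => p.1 == p.2)

theorem foldl_and_all {α : Type} (l : List α) (p : α → Bool) (b : Bool) :
    l.foldl (fun s x => s && p x) b = (b && l.all p) := by
  induction l generalizing b with
  | nil => simp
  | cons x t ih => simp [List.foldl_cons, ih, Bool.and_assoc]

theorem foldl_or_any {α : Type} (l : List α) (p : α → Bool) (b : Bool) :
    l.foldl (fun s x => s || p x) b = (b || l.any p) := by
  induction l generalizing b with
  | nil => simp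
  | cons x t ih => simp [List.foldl_cons, ih, Bool.or_assoc]

theorem foldl_adjZip {σ : Type} (xs : List Int) (f : σ → Int → Int → σ) :
    ∀ (k a : Nat), xs.length ≤ a + k → ∀ (s : σ),
    (PySem.List.pyRange ((a : Int) + 1) (xs.length : Int) 1).foldl
        (fun s i => f s (PySem.List.pyGetD xs (i - 1) 0) (PySem.List.pyGetD xs i 0)) s
      = ((xs.drop a).zip (xs.drop (a + 1))).foldl (fun s p => f s p.1 p.2) s := by
  intro k
  induction k with
  | zero =>
      intro a ha s
      rw [PySem.List.pyRange_one_eq_nil (by omega)]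
      rw [List.drop_eq_nil_of_le (show xs.length ≤ a by omega)]
      simp
  | succ k ih =>
      intro a ha s
      by_cases h : xs.length ≤ a + 1
      · rw [PySem.List.pyRange_one_eq_nil (by exact_mod_cast h)]
        rw [List.drop_eq_nil_of_le h]
        simp
      · rw [Nat.not_le] at h
        have h' : a + 1 < xs.length := h
        have h1 : a < xs.length := by omega
        rw [PySem.List.pyRange_one_cons (by exact_mod_cast by omega)]
        rw [List.foldl_cons]
        have e1 : ((a : Int) + 1 - 1) = ((a : Nat) : Int) := by ring
        have e2 : ((a : Int) + 1) = (((a + 1 : Nat)) : Int) := by push_cast; ring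
        rw [e1, e2, PySem.List.pyGetD_natCast, PySem.List.pyGetD_natCast]
        have := ih (a + 1) (by omega) (f s (xs.getD a 0) (xs.getD (a+1) 0))
        simp only [List.getD_eq_getElem _ _ h1, List.getD_eq_getElem _ _ h'] at this
        rw [List.getD_eq_getElem _ _ h1, List.getD_eq_getElem _ _ h', this]
        conv_rhs => rw [List.drop_eq_getElem_cons h', List.drop_eq_getElem_cons h1]
        rw [List.zip_cons_cons, List.foldl_cons]

theorem adjZip_zero {σ : Type} (xs : List Int) (f : σ → Int → Int → σ) (s : σ) :
    (PySem.List.pyRange 1 (xs.length : Int) 1).foldl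
        (fun s i => f s (PySem.List.pyGetD xs (i - 1) 0) (PySem.List.pyGetD xs i 0)) s
      = (xs.zip xs.tail).foldl (fun s p => f s p.1 p.2) s := by
  have := foldl_adjZip xs f xs.length 0 (by omega) s
  norm_num at this
  simpa using this


theorem repLoop_foldl (xs : List Int) (r : List Int) :
    isRepdromeLoop xs r
      = r.foldl (fun s i => s && (PySem.List.pyGetD xs (i - 1) 0 == PySem.List.pyGetD xs i 0)) true := by
  induction r with
  | nil => rfl
  | cons i rest ih =>
      by_cases h : PySem.List.pyGetD xs (i - 1) 0 = PySem.List.pyGetD xs i 0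
      · simp [isRepdromeLoop, h, ih]
      · simp [isRepdromeLoop, h, foldl_and_all]

theorem isRepdrome_char (xs : List Int) : isRepdrome xs = eqAdjB xs.dropLast := by
  cases hxs : xs with
  | nil => rfl
  | cons a t =>
      unfold isRepdrome
      rw [← hxs]
      have hne : xs ≠ [] := by simp [hxs]
      have hlen : xs.dropLast.length + 1 = xs.length := by
        simp [hxs]
      have e : ((xs.length : Int) - 1) = (xs.dropLast.length : Int) := by omega
      rw [repLoop_foldl, e]
      rw [PySem.List.foldl_congr_mem _ _
        (fun s i => s && (PySem.List.pyGetD xs.dropLast (i - 1) 0 == PySem.List.pyGetD xs.dropLast i 0))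
        true ?_]
      · rw [adjZip_zero xs.dropLast (fun s p q => s && (p == q)) true,
          foldl_and_all]
        simp [eqAdjB]
      · intro acc i hi
        rw [PySem.List.mem_pyRange_one] at hi
        have hgd : ∀ j : Int, 0 ≤ j → j < (xs.dropLast.length : Int) →
            PySem.List.pyGetD xs j 0 = PySem.List.pyGetD xs.dropLast j 0 := by
          intro j hj0 hj1
          rw [PySem.List.pyGetD_eq_getElem xs 0 hj0 (by omega),
            PySem.List.pyGetD_eq_getElem xs.dropLast 0 hj0 hj1,
            List.getElem_dropLast]
        rw [hgd (i - 1) (by omega) (by omega), hgd i (by omega) (by omega)]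

-- A characterization
theorem isPlaindrome_char (xs : List Int) :
    isPlaindrome xs = (dupB xs && sortedB xs && !(eqAdjB xs.dropLast)) := by
  unfold isPlaindrome
  rw [← isRepdrome_char]
  have hstep := adjZip_zero xs
    (fun (s : Bool × Bool) (prev cur : Int) =>
      let s1 := if prev > cur then (s.1, false) else s
      if prev = cur then (true, s1.2) else s1) (false, true)
  simp only [] at hstep ⊢
  rw [hstep]
  rw [PySem.List.foldl_congr_mem _ _
    (fun (s : Bool × Bool) (p : Int × Int) => (s.1 || (p.1 == p.2), s.2 && decide (p.1 ≤ p.2)))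
    (false, true) ?_]
  · rw [PySem.List.foldl_prod_mk (f := fun r (p : Int × Int) => r || (p.1 == p.2))
      (g := fun a (p : Int × Int) => a && decide (p.1 ≤ p.2)), foldl_or_any, foldl_and_all]
    simp [dupB, sortedB]
  · intro acc p _
    rcases acc with ⟨r, a⟩
    by_cases h1 : p.1 > p.2 <;> by_cases h2 : p.1 = p.2 <;> (simp [h1, h2]; try omega)

-- pairwise ≤ vs adjacent pairs
theorem zip_all_le_iff_pairwise (xs : List Int) :
    (sortedB xs = true) ↔ xs.Pairwise (· ≤ ·) := by
  unfold sortedB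
  induction xs with
  | nil => simp
  | cons a t ih =>
      cases t with
      | nil => simp
      | cons b u =>
          simp only [List.tail_cons, List.zip_cons_cons, List.all_cons, Bool.and_eq_true,
            decide_eq_true_eq, List.pairwise_cons] at *
          constructor
          · rintro ⟨hab, hrest⟩
            have hp := ih.mp hrest
            refine ⟨?_, hp⟩
            intro x hx
            rcases List.mem_cons.mp hx with rfl | hxu
            · exact hab
            · exact le_trans hab (hp.1 x hxu)
          · rintro ⟨hall, hp⟩
            exact ⟨hall b (List.mem_cons_self ..), ih.mpr hp⟩

theorem zip_all_eq_true_iff_head (xs : List Int) :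
    (eqAdjB xs = true) ↔ ∀ x ∈ xs, x = xs.headD 0 := by
  unfold eqAdjB
  induction xs with
  | nil => simp
  | cons a t ih =>
      cases t with
      | nil => simp
      | cons b u =>
          simp only [List.tail_cons, List.zip_cons_cons, List.all_cons, Bool.and_eq_true,
            beq_iff_eq, List.headD_cons] at *
          constructor
          · rintro ⟨rfl, hrest⟩
            intro x hx
            rcases List.mem_cons.mp hx with rfl | hx
            · rfl
            · exact ih.mp hrest x hx
          · intro hall
            have hb : b = a := hall b (by simp)
            subst hb
            refine ⟨rfl, ih.mpr ?_⟩
            intro x hx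
            exact hall x (by simp [hx])

theorem zip_any_eq_iff_not_nodup (xs : List Int) (hs : xs.Pairwise (· ≤ ·)) :
    (dupB xs = true) ↔ ¬ xs.Nodup := by
  unfold dupB
  induction xs with
  | nil => simp
  | cons a t ih =>
      cases t with
      | nil => simp
      | cons b u =>
          have hs' := (List.pairwise_cons.mp hs).2
          simp only [List.tail_cons, List.zip_cons_cons, List.any_cons, Bool.or_eq_true,
            beq_iff_eq] at *
          constructor
          · rintro (rfl | h)
            · intro hn; simp at hn
            · intro hn
              exact (ih hs').mp h (List.nodup_cons.mp hn).2
          · intro hn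
            by_cases hab : a = b
            · exact Or.inl hab
            · right
              apply (ih hs').mpr
              intro hnu
              apply hn
              constructor
              · intro x hx
                rcases List.mem_cons.mp hx with rfl | hxu
                · exact hab
                · have hb_le : b ≤ x := (List.pairwise_cons.mp hs').1 x hxu
                  have ha_le : a ≤ b := (List.pairwise_cons.mp hs).1 b (by simp)
                  intro rfl'
                  subst rfl'
                  exact hab (le_antisymm ha_le hb_le)
              · exact hnu

theorem ofList_sublist (xs : List Int) : (PySem.Set.ofList xs).Sublist xs := by
  induction xs using List.reverseRecOn with
  | nil => simp [PySem.Set.ofList]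
  | append_singleton t x ih =>
      rw [PySem.Set.ofList_append_singleton, PySem.Set.add_eq_ite]
      split_ifs with h
      · exact ih.trans (List.sublist_append_left t [x])
      · exact List.Sublist.append ih (List.Sublist.refl [x])

theorem ofList_len_eq_iff (xs : List Int) :
    (PySem.Set.ofList xs).length = xs.length ↔ xs.Nodup := by
  constructor
  · intro h
    have := (ofList_sublist xs).eq_of_length h
    rw [← this]
    exact PySem.Set.nodup_ofList xs
  · intro h
    rw [PySem.Set.ofList_eq_self_of_nodup xs h]

-- B characterization
theorem isPlaindrome_alt_char (xs : List Int) :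
    isPlaindrome_alt xs
      = (sortedB xs && !(decide xs.Nodup) && xs.any (fun x => decide (¬ (x = xs.getD 0 0)))) := by
  unfold isPlaindrome_alt
  have e1 : decide (xs = PySem.List.sorted xs (fun x => x) false) = sortedB xs := by
    by_cases h : xs.Pairwise (· ≤ ·)
    · have h1 : PySem.List.sorted xs (fun x => x) = xs :=
        PySem.List.sorted_eq_self_of_pairwise xs _ h
      rw [h1]
      simp [(zip_all_le_iff_pairwise xs).mpr h]
    · have h2 : ¬ (xs = PySem.List.sorted xs (fun x => x)) := by
        intro he
        exact h (by rw [he]; exact PySem.List.sorted_pairwise xs _)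
      rw [decide_eq_false h2,
        Bool.eq_false_iff.mpr (fun hc => h ((zip_all_le_iff_pairwise xs).mp hc))]
  have e2 : decide (¬ ((PySem.Set.ofList xs).len = (xs.length : Int))) = !(decide xs.Nodup) := by
    have hiff : ((PySem.Set.ofList xs).len = (xs.length : Int)) ↔ xs.Nodup := by
      rw [show (PySem.Set.ofList xs).len = ((PySem.Set.ofList xs).length : Int) from rfl,
        Nat.cast_inj]
      exact ofList_len_eq_iff xs
    by_cases hn : xs.Nodup
    · rw [decide_eq_true hn, Bool.not_true]
      exact decide_eq_false (fun hc => hc (hiff.mpr hn))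
    · rw [decide_eq_false hn, Bool.not_false]
      exact decide_eq_true (fun hc => hn (hiff.mp hc))
  rw [e1, e2]
  congr 1
  exact PySem.List.any_congr_mem (fun x _ => by rw [PySem.List.pyGetD_zero])

theorem getD_zero_eq_headD (xs : List Int) : xs.getD 0 0 = xs.headD 0 := by
  cases xs <;> rfl

theorem headD_dropLast (xs : List Int) (h : xs.dropLast ≠ []) :
    xs.dropLast.headD 0 = xs.headD 0 := by
  cases xs with
  | nil => rfl
  | cons a t =>
      cases t with
      | nil => simp at h
      | cons b u => simp [List.dropLast]

theorem pairwise_le_of_const (l : List Int) (c : Int) (h : ∀ x ∈ l, x = c) :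
    l.Pairwise (· ≤ ·) := by
  induction l with
  | nil => exact List.Pairwise.nil
  | cons a t ih =>
      refine List.Pairwise.cons ?_ (ih (fun x hx => h x (by simp [hx])))
      intro y hy
      rw [h a (by simp), h y (by simp [hy])]

theorem concat_decomp (xs : List Int) (h : xs ≠ []) : ∃ ys b, xs = ys ++ [b] := by
  rcases List.eq_nil_or_concat xs with rfl | ⟨ys, b, hc⟩
  · exact absurd rfl h
  · exact ⟨ys, b, by simpa using hc⟩

theorem main_unchanged' (xs : List Int) (hD : ¬ D_isPlaindrome xs) :
    isPlaindrome xs = isPlaindrome_alt xs := by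
  rw [isPlaindrome_char, isPlaindrome_alt_char]
  by_cases hs : xs.Pairwise (· ≤ ·)
  · rw [(zip_all_le_iff_pairwise xs).mpr hs]
    by_cases hn : xs.Nodup
    · rw [Bool.eq_false_iff.mpr (fun hc => ((zip_any_eq_iff_not_nodup xs hs).mp hc) hn),
        decide_eq_true hn]
      simp
    · rw [(zip_any_eq_iff_not_nodup xs hs).mpr hn, decide_eq_false hn]
      simp only [Bool.true_and, Bool.and_true, Bool.not_false, Bool.true_and]
      by_cases hq : ∀ x ∈ xs, x = xs.headD 0
      · have hany : (xs.any (fun x => decide (¬ (x = xs.getD 0 0)))) = false := by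
          rw [List.any_eq_false]
          intro x hx
          rw [getD_zero_eq_headD]
          simp [hq x hx]
        have hadj : eqAdjB xs.dropLast = true := by
          rw [zip_all_eq_true_iff_head]
          intro x hx
          have hne : xs.dropLast ≠ [] := by
            rintro he; rw [he] at hx; simp at hx
          rw [headD_dropLast xs hne]
          exact hq x (List.mem_of_mem_dropLast hx)
        rw [hany, hadj]
        rfl
      · obtain ⟨x, hx, hxne⟩ : ∃ x ∈ xs, ¬ x = xs.headD 0 := by simpa using hq
        have hany : (xs.any (fun x => decide (¬ (x = xs.getD 0 0)))) = true := by
          rw [List.any_eq_true]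
          refine ⟨x, hx, ?_⟩
          rw [getD_zero_eq_headD]
          simpa using hxne
        have hadj : eqAdjB xs.dropLast = false := by
          by_contra hcontra
          rw [Bool.not_eq_false, zip_all_eq_true_iff_head] at hcontra
          have hdl : ∀ y ∈ xs.dropLast, y = xs.headD 0 := by
            intro y hy
            have hne : xs.dropLast ≠ [] := by rintro he; rw [he] at hy; simp at hy
            rw [← headD_dropLast xs hne]
            exact hcontra y hy
          obtain ⟨ys, b, rfl⟩ := concat_decomp xs (by rintro rfl; simp at hx)
          have hdrop : (ys ++ [b]).dropLast = ys := by simp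
          have hxb : x = b := by
            rcases List.mem_append.mp hx with hxy | hxb
            · exact absurd (hdl x (by simp [hdrop, hxy])) hxne
            · simpa using hxb
          subst hxb
          obtain ⟨a, t, rfl⟩ : ∃ a t, ys = a :: t := by
            rcases ys with _ | ⟨a, t⟩
            · exfalso
              apply hxne
              simp at hx ⊢
            · exact ⟨a, t, rfl⟩
          have hheada : ((a :: t) ++ [x]).headD 0 = a := by simp
          obtain ⟨c, u, rfl⟩ : ∃ c u, t = c :: u := by
            rcases t with _ | ⟨c, u⟩
            · exfalso
              apply hn
              have hab : a ≠ x := by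
                intro he
                apply hxne
                rw [hheada]
                exact he.symm
              simp [hab]
            · exact ⟨c, u, rfl⟩
          apply hD
          refine ⟨by simp, ?_, ?_⟩
          · rw [List.all_eq_true]
            intro y hy
            simp only [beq_iff_eq]
            exact hdl y hy
          · have hlast : ((a :: c :: u) ++ [x]).getLastD 0 = x := by
              simp only [List.getLastD_eq_getLast?]
              rw [show a :: c :: u ++ [x] = (a :: c :: u) ++ [x] from rfl, List.getLast?_concat]
              rfl
            rw [hlast, hheada]
            have hble : a ≤ x := by
              rcases List.mem_cons.mp hx with rfl | hxt
              · exact le_refl _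
              · exact (List.pairwise_cons.mp hs).1 x hxt
            refine lt_of_le_of_ne hble ?_
            intro he
            apply hxne
            rw [hheada]
            exact he.symm
        rw [hany, hadj]
        rfl
  · rw [Bool.eq_false_iff.mpr (fun hc => hs ((zip_all_le_iff_pairwise xs).mp hc))]
    simp

theorem main_exact' (xs : List Int) (hD : D_isPlaindrome xs) :
    isPlaindrome xs = false ∧ isPlaindrome_alt xs = true := by
  obtain ⟨hlen, hall, hlt⟩ := hD
  obtain ⟨ys, b, rfl⟩ := concat_decomp xs (by rintro rfl; simp at hlen)
  have hdrop : (ys ++ [b]).dropLast = ys := by simp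
  have hlastD : (ys ++ [b]).getLastD 0 = b := by simp
  rw [hlastD] at hlt
  have hys2 : 2 ≤ ys.length := by simp at hlen; omega
  obtain ⟨a, t, rfl⟩ : ∃ a t, ys = a :: t := by
    rcases ys with _ | ⟨a, t⟩
    · simp at hys2
    · exact ⟨a, t, rfl⟩
  have hheadD : ((a :: t) ++ [b]).headD 0 = a := by simp
  rw [hheadD] at hlt
  rw [hdrop, List.all_eq_true] at hall
  simp only [beq_iff_eq, hheadD] at hall
  have hconst : ∀ y ∈ (a :: t), y = a := hall
  have hs : ((a :: t) ++ [b]).Pairwise (· ≤ ·) := by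
    rw [List.pairwise_append]
    refine ⟨pairwise_le_of_const _ a hconst, by simp, ?_⟩
    intro y hy z hz
    rw [hconst y hy]
    simp at hz
    rw [hz]
    exact le_of_lt hlt
  have hn : ¬ ((a :: t) ++ [b]).Nodup := by
    obtain ⟨c, u, rfl⟩ : ∃ c u, t = c :: u := by
      rcases t with _ | ⟨c, u⟩
      · simp at hys2
      · exact ⟨c, u, rfl⟩
    have hca : c = a := hconst c (by simp)
    subst hca
    simp
  constructor
  · rw [isPlaindrome_char]
    have hadj : eqAdjB ((a :: t) ++ [b]).dropLast = true := by
      rw [zip_all_eq_true_iff_head, hdrop]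
      intro y hy
      simp only [List.headD_cons]
      exact hconst y hy
    rw [hadj]
    simp
  · rw [isPlaindrome_alt_char]
    rw [(zip_all_le_iff_pairwise _).mpr hs, decide_eq_false hn]
    have hany : (((a :: t) ++ [b]).any
        (fun x => decide (¬ (x = ((a :: t) ++ [b]).getD 0 0)))) = true := by
      rw [List.any_eq_true]
      refine ⟨b, by simp, ?_⟩
      rw [getD_zero_eq_headD, hheadD]
      simp
      omega
    rw [hany]
    rfl

-- ===== VERDICT (by name: the statement is the Claim_ definition above) =====
theorem isPlaindrome_spec : Claim_unchanged_isPlaindrome := by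
  intro lists _ hD
  exact main_unchanged' lists hD

theorem isPlaindrome_changed : Claim_changed_isPlaindrome := by
  unfold Claim_changed_isPlaindrome; decide

theorem isPlaindrome_tight : Claim_exact_isPlaindrome := by
  intro lists _ hD
  have h := main_exact' lists hD
  simp [h.1, h.2]
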